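-- pv_equiv track=rewrite | github.com/vinnylarouge/neural_discocirc | src/train_model.py | train_test_depth_split
-- ===== SOURCE A (Python) =====
-- def train_test_depth_split(dataset, training_depths):
--     split_datasets = []
--     previous_length = 0
--     counter = 0
--     for q in dataset:
--         if len(q['context_circ']) < previous_length:
--             counter = 0
--         previous_length = len(q['context_circ'])
--         if len(split_datasets) <= counter:
--             split_datasets.append([])
--         split_datasets[counter].append(q)
--         counter += 1
--
--     training_dataset = []
--     validation_dataset = []
--     for i, set in enumerate(split_datasets):
--         if i in training_depths:
--             training_dataset += split_datasets[i]
--         else: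
--             validation_dataset += split_datasets[i]
--
--     return training_dataset, validation_dataset
-- ===== SOURCE B (Python) =====
-- def train_test_depth_split(dataset, training_depths):
--     # Pass 1: segment the dataset into runs; a new run starts when the
--     # context length strictly decreases (same reset condition as A).
--     runs = []
--     prev = None
--     for q in dataset:
--         L = len(q['context_circ'])
--         if prev is None or L < prev:
--             runs.append([q])
--         else:
--             runs[-1].append(q)
--         prev = L
--     # Pass 2: transpose the ragged runs into depth buckets.
--     width = max((len(r) for r in runs), default=0)
--     buckets = [[r[j] for r in runs if j < len(r)] for j in range(width)]
--     # Pass 3: concatenate buckets in ascending index order.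
--     training_dataset = [q for j, b in enumerate(buckets) if j in training_depths for q in b]
--     validation_dataset = [q for j, b in enumerate(buckets) if j not in training_depths for q in b]
--     return training_dataset, validation_dataset
-- ===== Notes on version B (the rewrite author's own statement) =====
-- stated objective: alternative
-- what changed: A interleaves bucketing into a single stateful loop (counter reset + in-place bucket append); B first segments the dataset into non-decreasing runs, then transposes the ragged runs into depth buckets, then builds the two outputs by bucket-order comprehensions.
import Mathlib
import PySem

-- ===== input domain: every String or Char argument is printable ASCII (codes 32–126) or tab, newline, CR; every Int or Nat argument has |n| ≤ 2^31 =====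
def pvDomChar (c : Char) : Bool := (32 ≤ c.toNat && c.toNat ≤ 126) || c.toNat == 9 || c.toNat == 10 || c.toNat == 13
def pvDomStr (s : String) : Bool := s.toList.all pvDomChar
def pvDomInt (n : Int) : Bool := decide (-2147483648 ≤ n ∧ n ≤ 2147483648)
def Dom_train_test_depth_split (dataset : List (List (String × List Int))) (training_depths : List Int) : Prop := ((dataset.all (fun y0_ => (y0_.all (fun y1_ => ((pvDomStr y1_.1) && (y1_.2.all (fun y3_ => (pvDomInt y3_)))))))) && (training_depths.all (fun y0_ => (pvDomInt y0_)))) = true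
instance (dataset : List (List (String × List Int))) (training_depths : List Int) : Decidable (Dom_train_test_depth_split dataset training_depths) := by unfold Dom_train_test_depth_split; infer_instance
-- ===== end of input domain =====

-- B replaces A's single stateful bucketing loop by segment-into-runs + ragged transpose
-- + bucket-order comprehensions (objective: alternative decomposition, same cost).

-- shared helper: len(q['context_circ']) — first-match association-list lookup;
-- KeyError (key absent) is excluded by Pre_ below, so the default [] is never used there
def ctxLen (q : List (String × List Int)) : Nat :=
  ((PySem.Dict.mk q).getD "context_circ" []).length

-- ===== PORT A =====
-- first loop of A: state (split_datasets, previous_length, counter)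
def splitLoopA : List (List (String × List Int)) → List (List (List (String × List Int))) → Nat → Nat → List (List (List (String × List Int)))
  | [], split, _, _ => split
  | q :: rest, split, prev, counter =>
      let L := ctxLen q
      let c := if L < prev then 0 else counter
      let split' := if split.length ≤ c then split ++ [[]] else split
      splitLoopA rest (split'.modify c (· ++ [q])) L (c + 1)

-- second loop of A: note split_datasets[i] with i from enumerate is exactly the enumerated element s
def selLoopA (td : List Int) : List (Int × List (List (String × List Int))) → List (List (String × List Int)) → List (List (String × List Int)) → (List (List (String × List Int))) × (List (List (String × List Int)))
  | [], t, v => (t, v)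
  | (i, s) :: rest, t, v =>
      if td.contains i then selLoopA td rest (t ++ s) v
      else selLoopA td rest t (v ++ s)

def train_test_depth_split (dataset : List (List (String × List Int))) (training_depths : List Int) : (List (List (String × List Int))) × (List (List (String × List Int))) :=
  let split := splitLoopA dataset [] 0 0
  selLoopA training_depths (PySem.List.enumerate split) [] []

-- ===== PORT B =====
-- pass 1 of B: segment into runs; runs[-1].append(q) is dropLast ++ [last ++ [q]]
def runsLoopB : List (List (String × List Int)) → List (List (List (String × List Int))) → Option Nat → List (List (List (String × List Int)))
  | [], runs, _ => runs
  | q :: rest, runs, prev =>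
      let L := ctxLen q
      let runs' := if prev.isNone || decide (L < prev.getD 0) then runs ++ [[q]]
                   else runs.dropLast ++ [runs.getLastD [] ++ [q]]
      runsLoopB rest runs' (some L)

def train_test_depth_split_alt (dataset : List (List (String × List Int))) (training_depths : List Int) : (List (List (String × List Int))) × (List (List (String × List Int))) :=
  let runs := runsLoopB dataset [] none
  let width := (runs.map List.length).foldl Nat.max 0
  -- [r[j] for r in runs if j < len(r)]: r[j]? is some exactly when j < len r
  let buckets := (List.range width).map (fun j => runs.filterMap (fun r => r[j]?))
  let train := ((PySem.List.enumerate buckets).filter (fun p => training_depths.contains p.1)).flatMap (·.2)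
  let val := ((PySem.List.enumerate buckets).filter (fun p => !training_depths.contains p.1)).flatMap (·.2)
  (train, val)

-- ===== PRECONDITION & SPEC =====
-- Pre_ excludes only inputs where A raises KeyError: some element lacks the 'context_circ' key.
def Pre_train_test_depth_split (dataset : List (List (String × List Int))) (training_depths : List Int) : Prop :=
  ∀ q ∈ dataset, (PySem.Dict.mk q).contains "context_circ" = true
instance (dataset : List (List (String × List Int))) (training_depths : List Int) : Decidable (Pre_train_test_depth_split dataset training_depths) := by unfold Pre_train_test_depth_split; infer_instance
def pvWitness_train_test_depth_split : (List (List (String × List Int))) × List Int :=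
  ([[("context_circ", [1, 2])], [("context_circ", [1])]], [0])
def Spec_train_test_depth_split (dataset : List (List (String × List Int))) (training_depths : List Int) (out : (List (List (String × List Int))) × (List (List (String × List Int)))) : Prop := out = train_test_depth_split_alt dataset training_depths
instance (dataset : List (List (String × List Int))) (training_depths : List Int) (out : (List (List (String × List Int))) × (List (List (String × List Int)))) : Decidable (Spec_train_test_depth_split dataset training_depths out) := by unfold Spec_train_test_depth_split; infer_instance

-- ===== CLAIM (what is proved, stated in full; the proofs are below) =====
def Claim_equal_train_test_depth_split : Prop := ∀ (dataset : List (List (String × List Int))) (training_depths : List Int), Dom_train_test_depth_split dataset training_depths → Pre_train_test_depth_split dataset training_depths → Spec_train_test_depth_split dataset training_depths (train_test_depth_split dataset training_depths)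

-- ===== LEMMAS AND PROOFS =====

-- the ragged transpose computed inline by train_test_depth_split_alt, as a named function
def Tr (runs : List (List (List (String × List Int)))) : List (List (List (String × List Int))) :=
  (List.range ((runs.map List.length).foldl Nat.max 0)).map (fun j => runs.filterMap (fun r => r[j]?))

def maxLen (runs : List (List (List (String × List Int)))) : Nat :=
  (runs.map List.length).foldl Nat.max 0

lemma maxLen_concat (init : List (List (List (String × List Int)))) (l : List (List (String × List Int))) :
    maxLen (init ++ [l]) = Nat.max (maxLen init) l.length := by
  simp [maxLen, List.foldl_append]

lemma acc_le_foldl_max : ∀ (l : List Nat) (acc : Nat), acc ≤ l.foldl Nat.max acc := by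
  intro l
  induction l with
  | nil => intro acc; simp
  | cons a t ih =>
      intro acc
      calc acc ≤ Nat.max acc a := Nat.le_max_left _ _
        _ ≤ t.foldl Nat.max (Nat.max acc a) := ih _

lemma mem_le_foldl_max : ∀ (l : List Nat) (acc x : Nat), x ∈ l → x ≤ l.foldl Nat.max acc := by
  intro l
  induction l with
  | nil => intro _ _ h; cases h
  | cons a t ih =>
      intro acc x h
      rcases List.mem_cons.mp h with h | h
      · subst h
        calc x ≤ Nat.max acc x := Nat.le_max_right _ _
          _ ≤ t.foldl Nat.max (Nat.max acc x) := acc_le_foldl_max _ _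
      · exact ih _ _ h

lemma le_maxLen {r : List (List (String × List Int))} {runs : List (List (List (String × List Int)))}
    (h : r ∈ runs) : r.length ≤ maxLen runs :=
  mem_le_foldl_max _ 0 _ (List.mem_map_of_mem h)

lemma length_Tr (runs : List (List (List (String × List Int)))) : (Tr runs).length = maxLen runs := by
  simp [Tr, maxLen]

lemma Tr_append_nil (runs : List (List (List (String × List Int)))) : Tr (runs ++ [[]]) = Tr runs := by
  simp [Tr, List.filterMap_append]

lemma modify_concat_length {α : Type} (l : List α) (a : α) (g : α → α) :
    (l ++ [a]).modify l.length g = l ++ [g a] := by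
  apply List.ext_getElem?
  intro k
  rw [List.getElem?_modify]
  rcases lt_trichotomy k l.length with hk | hk | hk
  · rw [List.getElem?_append_left hk, List.getElem?_append_left hk]
    rcases h : l[k]? with _ | x
    · rfl
    · simp [if_neg (by omega : ¬ l.length = k)]
  · subst hk
    rw [List.getElem?_concat_length, List.getElem?_concat_length]
    simp
  · have h1 : (l ++ [a])[k]? = none := by
      rw [List.getElem?_eq_none_iff]; simp; omega
    have h2 : (l ++ [g a])[k]? = none := by
      rw [List.getElem?_eq_none_iff]; simp; omega
    rw [h1, h2]; rfl

lemma Tr_getElem? (R : List (List (List (String × List Int)))) (k : Nat) :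
    (Tr R)[k]? = if k < maxLen R then some (R.filterMap (fun r => r[k]?)) else none := by
  simp only [Tr, maxLen, List.getElem?_map]
  rcases Nat.lt_or_ge k ((R.map List.length).foldl Nat.max 0) with h | h
  · rw [List.getElem?_range h, if_pos h]; rfl
  · rw [if_neg (by omega), List.getElem?_eq_none_iff.mpr (by simpa using h)]; rfl

lemma filterMap_single {α β : Type} (f : α → Option β) (a : α) :
    List.filterMap f [a] = (f a).toList := by
  cases h : f a <;> simp [h]

-- core step lemma: appending q to the last run acts on the transpose exactly like A's step
lemma Tr_append_last (init : List (List (List (String × List Int)))) (last : List (List (String × List Int))) (q : List (String × List Int)) :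
    Tr (init ++ [last ++ [q]]) =
      (if (Tr (init ++ [last])).length ≤ last.length
       then Tr (init ++ [last]) ++ [[]]
       else Tr (init ++ [last])).modify last.length (· ++ [q]) := by
  have hlen : (Tr (init ++ [last])).length = Nat.max (maxLen init) last.length := by
    rw [length_Tr, maxLen_concat]
  by_cases hc : maxLen init ≤ last.length
  · -- the last run is (weakly) the longest: a new bucket [q] is appended
    have hmax : Nat.max (maxLen init) last.length = last.length := Nat.max_eq_right hc
    have hinit : init.filterMap (fun r => r[last.length]?) = [] := by
      rw [List.filterMap_eq_nil_iff]
      intro r hr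
      rw [List.getElem?_eq_none_iff]
      exact le_trans (le_maxLen hr) hc
    have h1 : Tr (init ++ [last ++ [q]]) = Tr (init ++ [last]) ++ [[q]] := by
      unfold Tr
      rw [show ((init ++ [last ++ [q]]).map List.length).foldl Nat.max 0
            = last.length + 1 by
          have h := maxLen_concat init (last ++ [q])
          simp only [maxLen] at h
          rw [h, List.length_append, List.length_cons, List.length_nil]
          exact Nat.max_eq_right (le_trans hc (Nat.le_succ _))]
      rw [show ((init ++ [last]).map List.length).foldl Nat.max 0 = last.length by
          have h := maxLen_concat init last
          simp only [maxLen] at h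
          rw [h]; exact Nat.max_eq_right hc]
      rw [List.range_succ, List.map_append]
      congr 1
      · apply List.map_congr_left
        intro k hk
        rw [List.mem_range] at hk
        rw [List.filterMap_append, List.filterMap_append]
        have h2 : (last ++ [q])[k]? = last[k]? := List.getElem?_append_left hk
        simp [filterMap_single, h2]
      · simp only [List.map_cons, List.map_nil, List.filterMap_append, hinit]
        simp
    rw [h1, if_pos (by rw [hlen]; exact Nat.max_le.mpr ⟨hc, le_refl _⟩)]
    rw [show last.length = (Tr (init ++ [last])).length by rw [hlen, hmax]]
    rw [modify_concat_length]
    simp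
  · -- the last run is strictly shorter than the widest: bucket last.length grows
    have hj : last.length < maxLen init := by omega
    have hmax : Nat.max (maxLen init) last.length = maxLen init := Nat.max_eq_left (le_of_lt hj)
    rw [if_neg (by rw [hlen]; intro h; exact hc (le_trans (Nat.le_max_left _ _) h))]
    apply List.ext_getElem?
    intro k
    rw [List.getElem?_modify, Tr_getElem?, Tr_getElem?]
    rw [maxLen_concat, maxLen_concat, hmax]
    rw [show Nat.max (maxLen init) (last ++ [q]).length = maxLen init from
          Nat.max_eq_left (by simpa using hj)]
    by_cases hk : k < maxLen init
    · rw [if_pos hk, if_pos hk]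
      simp only [Option.map_eq_map, Option.map_some]
      by_cases hkj : last.length = k
      · subst hkj
        rw [if_pos rfl]
        rw [List.filterMap_append, List.filterMap_append]
        simp
      · rw [if_neg hkj]
        rw [List.filterMap_append, List.filterMap_append]
        have : (last ++ [q])[k]? = last[k]? := by
          rcases Nat.lt_or_ge k last.length with h | h
          · exact List.getElem?_append_left h
          · have hgt : last.length < k := by omega
            rw [List.getElem?_eq_none_iff.mpr (by omega : last.length ≤ k)]
            rw [List.getElem?_eq_none_iff.mpr (by simp; omega : (last ++ [q]).length ≤ k)]
        simp [filterMap_single, this]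
    · rw [if_neg hk, if_neg hk]; rfl
-- loop invariant: A's split is the transpose of B's runs, counter = length of the last run
lemma splitA_eq_Tr (ds : List (List (String × List Int))) :
    ∀ (runs : List (List (List (String × List Int)))) (prev : Option Nat),
      (prev = none → runs = []) → (prev ≠ none → runs ≠ []) →
      splitLoopA ds (Tr runs) (prev.getD 0) (runs.getLastD []).length
        = Tr (runsLoopB ds runs prev) := by
  induction ds with
  | nil => intro runs prev _ _; simp [splitLoopA, runsLoopB]
  | cons q rest ih =>
      intro runs prev h0 h1
      cases prev with
      | none =>
          have hr : runs = [] := h0 rfl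
          subst hr
          simp only [splitLoopA, runsLoopB, Option.getD_none, Option.isNone_none,
            Bool.true_or, if_true, List.getLastD_nil, List.length_nil,
            Nat.not_lt_zero, if_false, List.nil_append]
          have hstep : ((if (Tr ([] : List (List (List (String × List Int))))).length ≤ 0
              then Tr [] ++ [[]] else Tr []).modify 0 (fun x => x ++ [q])) = Tr [[q]] := by
            simp [Tr, List.modify, List.range_succ]
          rw [hstep]
          have h2 := ih [[q]] (some (ctxLen q)) (by intro h; cases h) (by intro _ h; cases h)
          simpa using h2
      | some p =>
          have hr : runs ≠ [] := h1 (by intro h; cases h)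
          rcases List.eq_nil_or_concat runs with h | ⟨init, last, h⟩
          · exact absurd h hr
          subst h
          rw [List.concat_eq_append]
          simp only [splitLoopA, runsLoopB, Option.getD_some, Option.isNone_some,
            Bool.false_or, decide_eq_true_eq, List.getLastD_concat, List.dropLast_concat]
          by_cases hL : ctxLen q < p
          · rw [if_pos hL, if_pos hL]
            have hstep : ((if (Tr (init ++ [last])).length ≤ 0
                then Tr (init ++ [last]) ++ [[]] else Tr (init ++ [last])).modify 0 (fun x => x ++ [q]))
                = Tr ((init ++ [last]) ++ [[q]]) := by
              have h2 := Tr_append_last (init ++ [last]) [] q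
              rw [Tr_append_nil] at h2
              simpa using h2.symm
            rw [hstep]
            have h3 := ih ((init ++ [last]) ++ [[q]]) (some (ctxLen q))
              (by intro h; cases h) (by intro _ h; simp at h)
            rw [List.getLastD_concat] at h3
            simpa using h3
          · rw [if_neg hL, if_neg hL]
            rw [← Tr_append_last init last q]
            have h3 := ih (init ++ [last ++ [q]]) (some (ctxLen q))
              (by intro h; cases h) (by intro _ h; simp at h)
            rw [List.getLastD_concat] at h3
            simpa using h3
lemma selLoopA_eq (td : List Int) (l : List (Int × List (List (String × List Int))))
    (t v : List (List (String × List Int))) :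
    selLoopA td l t v =
      (t ++ (l.filter (fun p => td.contains p.1)).flatMap (·.2),
       v ++ (l.filter (fun p => !td.contains p.1)).flatMap (·.2)) := by
  induction l generalizing t v with
  | nil => simp [selLoopA]
  | cons p rest ih =>
      obtain ⟨i, s⟩ := p
      by_cases h : i ∈ td
      · simp [selLoopA, h, ih]
      · simp [selLoopA, h, ih]

-- ===== VERDICT (by name: the statement is the Claim_ definition above) =====
theorem train_test_depth_split_spec : Claim_equal_train_test_depth_split := by
  intro ds td _ _
  unfold Spec_train_test_depth_split train_test_depth_split train_test_depth_split_alt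
  have h := splitA_eq_Tr ds [] none (fun _ => rfl) (fun h => absurd rfl h)
  simp only [Tr] at h ⊢
  simp only [List.map_nil, List.foldl_nil, List.range_zero, List.getLastD_nil,
    List.length_nil, Option.getD_none] at h
  rw [h, selLoopA_eq]
  simp
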